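-- pv_equiv track=rewrite | github.com/mountain/knot-alexander | torsion2.py | get_canonical_path_string_A_then_M
-- ===== SOURCE A (Python) =====
-- def get_canonical_path_string_A_then_M(relator_str, mapping_description):
--     """
--     Generates a canonical path string from the original relator string based on the given mapping
--     (all additive-type operations first, then all multiplicative-type operations).
--     This preserves the relative order of operations within each type.
--
--     Args:
--         relator_str (str): The original relator string (e.g., "aaBAbbbAB").
--         mapping_description (str): A string describing the mapping, e.g.,
--                                    "'a' as multiplicative, 'b' as additive".
--
--     Returns:
--         str: The canonical path string with additions/subtractions first,
--              followed by multiplications/divisions.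
--     """
--     additive_chars_list = []
--     multiplicative_chars_list = []
--
--     # Determine the current mapping type ('a' is multiplicative or 'b' is multiplicative)
--     is_a_multiplicative = "'a' as multiplicative" in mapping_description
--
--     for char_code in relator_str:
--         if is_a_multiplicative:
--             if char_code.lower() == 'a':  # 'a' or 'A' are multiplicative
--                 multiplicative_chars_list.append(char_code)
--             elif char_code.lower() == 'b':  # 'b' or 'B' are additive
--                 additive_chars_list.append(char_code)
--         else:  # 'b' is the multiplicative generator in the mapping
--             if char_code.lower() == 'b':  # 'b' or 'B' are multiplicative
--                 multiplicative_chars_list.append(char_code)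
--             elif char_code.lower() == 'a':  # 'a' or 'A' are additive
--                 additive_chars_list.append(char_code)
--
--     # Concatenate: all original additive characters first, then all original multiplicative characters.
--     # This method preserves the original relative order within each category of operations.
--     canonical_path_str = "".join(additive_chars_list) + "".join(multiplicative_chars_list)
--     return canonical_path_str
-- ===== SOURCE B (Python) =====
-- def get_canonical_path_string_A_then_M(relator_str, mapping_description):
--     # Idiomatic: keep only a/b letters and stably sort them with multiplicative ones keyed last.
--     mult = 'a' if "'a' as multiplicative" in mapping_description else 'b'
--     kept = [c for c in relator_str if c.lower() in ('a', 'b')]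
--     return ''.join(sorted(kept, key=lambda c: 1 if c.lower() == mult else 0))
-- ===== Notes on version B (the rewrite author's own statement) =====
-- stated objective: idiomatic
-- what changed: Replaces the two manually maintained accumulator lists with a filter plus a stable sort keyed 0/1 (additive before multiplicative), relying on sort stability for within-group order.
import Mathlib
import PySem

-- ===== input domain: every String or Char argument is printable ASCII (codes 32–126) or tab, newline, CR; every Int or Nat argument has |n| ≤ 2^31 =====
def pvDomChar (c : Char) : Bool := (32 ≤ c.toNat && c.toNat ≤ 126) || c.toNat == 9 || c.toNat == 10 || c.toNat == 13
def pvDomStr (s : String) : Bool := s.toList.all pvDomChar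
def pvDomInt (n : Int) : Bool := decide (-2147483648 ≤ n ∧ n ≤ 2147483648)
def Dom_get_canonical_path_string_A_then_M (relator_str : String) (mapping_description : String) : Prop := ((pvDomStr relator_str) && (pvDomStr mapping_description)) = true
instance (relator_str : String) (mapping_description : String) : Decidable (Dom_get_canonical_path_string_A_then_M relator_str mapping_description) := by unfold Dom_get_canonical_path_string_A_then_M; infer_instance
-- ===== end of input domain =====

-- B: same return value, built by filtering to a/b letters and one stable sort on a 0/1 key instead of A's two accumulator lists.
-- ===== PORT A =====
def get_canonical_path_string_A_then_M (relator_str : String) (mapping_description : String) : String :=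
  let is_a_multiplicative := PySem.Str.isIn "'a' as multiplicative" mapping_description
  let p := relator_str.toList.foldl (fun (acc : List Char × List Char) char_code =>
    if is_a_multiplicative then
      if PySem.Chars.lowerChar char_code == 'a' then (acc.1, acc.2 ++ [char_code])
      else if PySem.Chars.lowerChar char_code == 'b' then (acc.1 ++ [char_code], acc.2)
      else acc
    else
      if PySem.Chars.lowerChar char_code == 'b' then (acc.1, acc.2 ++ [char_code])
      else if PySem.Chars.lowerChar char_code == 'a' then (acc.1 ++ [char_code], acc.2)
      else acc) ([], [])
  String.ofList (p.1 ++ p.2)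

-- ===== PORT B =====
def get_canonical_path_string_A_then_M_alt (relator_str : String) (mapping_description : String) : String :=
  let mult : Char := if PySem.Str.isIn "'a' as multiplicative" mapping_description then 'a' else 'b'
  let kept := relator_str.toList.filter
    (fun c => PySem.Chars.lowerChar c == 'a' || PySem.Chars.lowerChar c == 'b')
  String.ofList (PySem.List.sorted kept
    (fun c => if PySem.Chars.lowerChar c == mult then (1 : Int) else 0) false)

-- ===== PRECONDITION & SPEC =====
def Spec_get_canonical_path_string_A_then_M (relator_str : String) (mapping_description : String) (out : String) : Prop := out = get_canonical_path_string_A_then_M_alt relator_str mapping_description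
instance (relator_str : String) (mapping_description : String) (out : String) : Decidable (Spec_get_canonical_path_string_A_then_M relator_str mapping_description out) := by unfold Spec_get_canonical_path_string_A_then_M; infer_instance

-- ===== CLAIM (what is proved, stated in full; the proofs are below) =====
def Claim_equal_get_canonical_path_string_A_then_M : Prop := ∀ (relator_str : String) (mapping_description : String), Dom_get_canonical_path_string_A_then_M relator_str mapping_description → Spec_get_canonical_path_string_A_then_M relator_str mapping_description (get_canonical_path_string_A_then_M relator_str mapping_description)

-- ===== LEMMAS AND PROOFS =====

-- Inserting a key-0 element into a list of key-0s followed by key-1s places it between the groups.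
theorem insertBy_zero_mid {α : Type} (key : α → Int) (x : α) (A M : List α)
    (hA : ∀ a ∈ A, key a = 0) (hM : ∀ m ∈ M, key m = 1) (hx : key x = 0) :
    PySem.List.insertBy (fun a b => decide (key a < key b)) x (A ++ M) = A ++ x :: M := by
  induction A with
  | nil =>
    cases M with
    | nil => simp [PySem.List.insertBy]
    | cons m ms =>
      have hm : key m = 1 := hM m (by simp)
      simp [PySem.List.insertBy, hx, hm]
  | cons a A' ih =>
    have ha : key a = 0 := hA a (by simp)
    simp only [List.cons_append, PySem.List.insertBy, hx, ha]
    rw [if_neg (by simp), ih (fun a h => hA a (by simp [h]))]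

-- Inserting a key-1 element appends it at the end.
theorem insertBy_one_end {α : Type} (key : α → Int) (x : α) (A M : List α)
    (hA : ∀ a ∈ A, key a = 0) (hM : ∀ m ∈ M, key m = 1) (hx : key x = 1) :
    PySem.List.insertBy (fun a b => decide (key a < key b)) x (A ++ M) = (A ++ M) ++ [x] := by
  apply PySem.List.insertBy_of_forall_not_before
  intro y hy
  rcases List.mem_append.mp hy with h | h
  · have := hA y h; simp [hx, this]
  · have := hM y h; simp [hx, this]

-- Insertion-sort with a {0,1}-valued key is the stable partition.
theorem foldl_insertBy_partition {α : Type} (key : α → Int)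
    (hk : ∀ c, key c = 0 ∨ key c = 1) (l A M : List α)
    (hA : ∀ a ∈ A, key a = 0) (hM : ∀ m ∈ M, key m = 1) :
    l.foldl (fun acc x => PySem.List.insertBy (fun a b => decide (key a < key b)) x acc) (A ++ M)
      = (A ++ l.filter (fun c => decide (key c = 0))) ++ (M ++ l.filter (fun c => decide (key c = 1))) := by
  induction l generalizing A M with
  | nil => simp
  | cons c l' ih =>
    rcases hk c with h0 | h1
    · rw [List.foldl_cons, insertBy_zero_mid key c A M hA hM h0]
      have hstep : A ++ c :: M = (A ++ [c]) ++ M := by simp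
      have hA' : ∀ a ∈ A ++ [c], key a = 0 := by
        intro a ha
        rcases List.mem_append.mp ha with h | h
        · exact hA a h
        · simp at h; simpa [h] using h0
      rw [hstep, ih (A ++ [c]) M hA' hM]
      simp [h0]
    · rw [List.foldl_cons, insertBy_one_end key c A M hA hM h1]
      have hstep : (A ++ M) ++ [c] = A ++ (M ++ [c]) := by simp
      have hM' : ∀ m ∈ M ++ [c], key m = 1 := by
        intro m hm
        rcases List.mem_append.mp hm with h | h
        · exact hM m h
        · simp at h; simpa [h] using h1
      rw [hstep, ih A (M ++ [c]) hA hM']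
      have h1' : ¬ key c = 0 := by omega
      simp [h1]

theorem sorted_binary {α : Type} (key : α → Int) (hk : ∀ c, key c = 0 ∨ key c = 1) (l : List α) :
    PySem.List.sorted l key false
      = l.filter (fun c => decide (key c = 0)) ++ l.filter (fun c => decide (key c = 1)) := by
  have := foldl_insertBy_partition key hk l [] [] (by simp) (by simp)
  simpa [PySem.List.sorted] using this

-- A's accumulator loop computes the two filters.
theorem foldl_A_loop (mult add : Char) (hne : mult ≠ add) (l : List Char) (A M : List Char) :
    (l.foldl (fun (acc : List Char × List Char) c =>
      if PySem.Chars.lowerChar c == mult then (acc.1, acc.2 ++ [c])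
      else if PySem.Chars.lowerChar c == add then (acc.1 ++ [c], acc.2)
      else acc) (A, M))
    = (A ++ l.filter (fun c => PySem.Chars.lowerChar c == add),
       M ++ l.filter (fun c => PySem.Chars.lowerChar c == mult)) := by
  induction l generalizing A M with
  | nil => simp
  | cons c l' ih =>
    rw [List.foldl_cons]
    by_cases hm : PySem.Chars.lowerChar c = mult
    · rw [if_pos (by simp [hm]), ih]
      simp [hm, hne]
    · by_cases ha : PySem.Chars.lowerChar c = add
      · rw [if_neg (by simp [hm]), if_pos (by simp [ha]), ih]
        simp [ha, Ne.symm hne]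
      · rw [if_neg (by simp [hm]), if_neg (by simp [ha]), ih]
        simp [ha, hm]

-- The kept characters split by the 0/1 key are exactly A's two filters.
theorem kept_filter_split (mult add : Char)
    (hab : (mult = 'a' ∧ add = 'b') ∨ (mult = 'b' ∧ add = 'a')) (l : List Char) :
    ((l.filter (fun c => PySem.Chars.lowerChar c == 'a' || PySem.Chars.lowerChar c == 'b')).filter
        (fun c => decide ((if PySem.Chars.lowerChar c == mult then (1 : Int) else 0) = 0))
      = l.filter (fun c => PySem.Chars.lowerChar c == add))
    ∧ ((l.filter (fun c => PySem.Chars.lowerChar c == 'a' || PySem.Chars.lowerChar c == 'b')).filter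
        (fun c => decide ((if PySem.Chars.lowerChar c == mult then (1 : Int) else 0) = 1))
      = l.filter (fun c => PySem.Chars.lowerChar c == mult)) := by
  rcases hab with ⟨h1, h2⟩ | ⟨h1, h2⟩ <;> subst h1 <;> subst h2 <;>
    refine ⟨?_, ?_⟩ <;> rw [List.filter_filter] <;> apply List.filter_congr <;>
      (intro c _
       by_cases hA : PySem.Chars.lowerChar c = 'a' <;>
         by_cases hB : PySem.Chars.lowerChar c = 'b' <;> simp_all)

theorem key_cases (mult : Char) :
    ∀ c : Char, (if PySem.Chars.lowerChar c == mult then (1 : Int) else 0) = 0 ∨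
      (if PySem.Chars.lowerChar c == mult then (1 : Int) else 0) = 1 := by
  intro c; split <;> simp

-- ===== VERDICT (by name: the statement is the Claim_ definition above) =====
theorem get_canonical_path_string_A_then_M_spec : Claim_equal_get_canonical_path_string_A_then_M := by
  intro r m _
  unfold Spec_get_canonical_path_string_A_then_M
  unfold get_canonical_path_string_A_then_M get_canonical_path_string_A_then_M_alt
  by_cases hin : PySem.Str.isIn "'a' as multiplicative" m = true
  · simp only [hin, if_true]
    rw [foldl_A_loop 'a' 'b' (by decide), sorted_binary _ (key_cases 'a'),
        (kept_filter_split 'a' 'b' (Or.inl ⟨rfl, rfl⟩) r.toList).1,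
        (kept_filter_split 'a' 'b' (Or.inl ⟨rfl, rfl⟩) r.toList).2]
    simp
  · simp only [Bool.not_eq_true] at hin
    simp only [hin, if_false, Bool.false_eq_true]
    rw [foldl_A_loop 'b' 'a' (by decide), sorted_binary _ (key_cases 'b'),
        (kept_filter_split 'b' 'a' (Or.inr ⟨rfl, rfl⟩) r.toList).1,
        (kept_filter_split 'b' 'a' (Or.inr ⟨rfl, rfl⟩) r.toList).2]
    simp
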